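-- pv_equiv track=rewrite | github.com/HanJDiedrich/MadLibs_game | MadLibs.py | blanks
-- ===== SOURCE A (Python) =====
-- def blanks(script):
--     indicators = ['**nos**','**nop**','**ver**','**adj**','**adv**','**num**']
--     qOrder = [] #n, v, j, d, m
--
--     #check every 7 characters to find our indicators
--     for i in range(0, len(script)):
--         segment = script[i:i+7]
--         if segment in indicators:
--             #noun singular (s)
--             if segment == indicators[0]:
--                 qOrder.append('s')
--             #noun plural (p)
--             if segment == indicators[1]:
--                 qOrder.append('p')
--             #verb (v)
--             if segment == indicators[2]:
--                 qOrder.append('v')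
--             #adjective (j)
--             if segment == indicators[3]:
--                 qOrder.append('j')
--             #adverb (d)
--             if segment == indicators[4]:
--                 qOrder.append('d')
--             #number (m)
--             if segment == indicators[5]:
--                 qOrder.append('m')
--
--             #replace indicator in the script with a blank
--             script = script[:i] + "_______" + script[i+7:]
--
--         #End when the final segment covers the end of the script
--         if (i + 7) == len(script):
--             break
--     #Now we get the order of and questions that should be asked to fill in the madlib
--     return qOrder, script
-- ===== SOURCE B (Python) =====
-- def blanks(script):
--     # One forward pass: dict lookup of the 7-char window; on a hit emit seven
--     # underscores and jump past the indicator, otherwise copy one character.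
--     mapping = {'**nos**': 's', '**nop**': 'p', '**ver**': 'v',
--                '**adj**': 'j', '**adv**': 'd', '**num**': 'm'}
--     qOrder = []
--     parts = []
--     i = 0
--     n = len(script)
--     while i < n:
--         code = mapping.get(script[i:i+7])
--         if code is None:
--             parts.append(script[i])
--             i += 1
--         else:
--             qOrder.append(code)
--             parts.append('_______')
--             i += 7
--     return qOrder, ''.join(parts)
-- ===== Notes on version B (the rewrite author's own statement) =====
-- stated objective: simpler
-- what changed: A rescans from every index, splicing seven underscores into the script in place with an if-cascade and a break; B makes one forward pass with a dict lookup of the 7-char window, appending either the current character or seven underscores to a parts list joined at the end, and jumping past each match.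
import Mathlib
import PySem

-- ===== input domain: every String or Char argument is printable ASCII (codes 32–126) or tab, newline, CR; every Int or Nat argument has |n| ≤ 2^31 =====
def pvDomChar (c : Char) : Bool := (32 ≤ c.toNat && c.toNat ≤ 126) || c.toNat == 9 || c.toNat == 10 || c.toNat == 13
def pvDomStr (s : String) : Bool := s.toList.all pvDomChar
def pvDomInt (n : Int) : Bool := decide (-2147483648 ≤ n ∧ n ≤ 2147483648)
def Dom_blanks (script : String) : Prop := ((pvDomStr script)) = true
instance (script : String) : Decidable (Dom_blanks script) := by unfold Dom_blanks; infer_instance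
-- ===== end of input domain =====

-- B replaces A's rescan-after-in-place-splice loop by a single forward pass with a
-- dict lookup of the 7-char window, emitting the blanked text as it goes (objective: simpler).

-- ===== PORT A =====
-- indicators = ['**nos**', …]
def blanksInds : List String := ["**nos**", "**nop**", "**ver**", "**adj**", "**adv**", "**num**"]

-- the 'for i in range(0, len(script))' loop; fuel = number of remaining iterations,
-- i the current index, q the qOrder accumulator, s the (mutated) script
def blanksLoop : Nat → Nat → List String → String → List String × String
  | 0, _, q, s => (q, s)
  | k+1, i, q, s =>
    let segment := PySem.Str.slice s (some (i : Int)) (some ((i : Int) + 7))   -- script[i:i+7]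
    if segment ∈ blanksInds then
      let q1 := if segment = "**nos**" then q ++ ["s"] else q
      let q2 := if segment = "**nop**" then q1 ++ ["p"] else q1
      let q3 := if segment = "**ver**" then q2 ++ ["v"] else q2
      let q4 := if segment = "**adj**" then q3 ++ ["j"] else q3
      let q5 := if segment = "**adv**" then q4 ++ ["d"] else q4
      let q6 := if segment = "**num**" then q5 ++ ["m"] else q5
      -- script = script[:i] + "_______" + script[i+7:]
      let s' := PySem.Str.slice s none (some (i : Int)) ++ "_______" ++
                PySem.Str.slice s (some ((i : Int) + 7)) none
      if (i : Int) + 7 = PySem.Str.len s' then (q6, s')       -- break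
      else blanksLoop k (i+1) q6 s'
    else
      if (i : Int) + 7 = PySem.Str.len s then (q, s)          -- break
      else blanksLoop k (i+1) q s

def blanks (script : String) : List String × String :=
  blanksLoop (PySem.Str.len script).toNat 0 [] script

-- ===== PORT B =====
-- mapping = {'**nos**': 's', …}
def blanksMapping : PySem.Dict String String :=
  PySem.Dict.mk [("**nos**", "s"), ("**nop**", "p"), ("**ver**", "v"),
                 ("**adj**", "j"), ("**adv**", "d"), ("**num**", "m")]

-- the 'while i < n' loop of Source B, on the script's character list:
-- script[i:i+7] is (cs.drop i).take 7 and script[i] is cs[i] (exact for 0 ≤ i)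
def blanksAltLoop (cs : List Char) (i : Nat) (q : List String) (parts : List String) :
    List String × String :=
  if h : i < cs.length then
    match PySem.Dict.get? blanksMapping (String.ofList ((cs.drop i).take 7)) with
    | none => blanksAltLoop cs (i+1) q (parts ++ [String.ofList [cs[i]]])
    | some code => blanksAltLoop cs (i+7) (q ++ [code]) (parts ++ ["_______"])
  else (q, PySem.Str.join "" parts)
  termination_by cs.length - i
  decreasing_by all_goals omega

def blanks_alt (script : String) : List String × String :=
  blanksAltLoop script.toList 0 [] []

-- ===== PRECONDITION & SPEC =====
def Spec_blanks (script : String) (out : List String × String) : Prop := out = blanks_alt script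
instance (script : String) (out : List String × String) : Decidable (Spec_blanks script out) := by unfold Spec_blanks; infer_instance

-- ===== CLAIM (what is proved, stated in full; the proofs are below) =====
def Claim_equal_blanks : Prop := ∀ (script : String), Dom_blanks script → Spec_blanks script (blanks script)

-- ===== LEMMAS AND PROOFS =====

-- the indicator lookup, as a function of the window's character list
def pvCode? (l : List Char) : Option String :=
  PySem.Dict.get? blanksMapping (String.ofList l)

-- common specification: one left-to-right non-overlapping scan of the characters
def pvScan : List Char → List String × List Char
  | [] => ([], [])
  | c :: rest =>
    match pvCode? (List.take 7 (c :: rest)) with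
    | some code =>
      let r := pvScan (rest.drop 6)
      (code :: r.1, List.replicate 7 '_' ++ r.2)
    | none =>
      let r := pvScan rest
      (r.1, c :: r.2)
  termination_by l => l.length
  decreasing_by all_goals (simp only [List.length_cons, List.length_drop]; omega)

lemma pvCode?_none_of_notMem (l : List Char) (h : String.ofList l ∉ blanksInds) :
    pvCode? l = none := by
  simp [blanksInds] at h
  obtain ⟨h1, h2, h3, h4, h5, h6⟩ := h
  simp [pvCode?, blanksMapping, PySem.Dict.get?]
  exact ⟨fun e => h1 e.symm, fun e => h2 e.symm, fun e => h3 e.symm,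
         fun e => h4 e.symm, fun e => h5 e.symm, fun e => h6 e.symm⟩

lemma pvInds_len : ∀ s ∈ blanksInds, s.toList.length = 7 := by decide

lemma pvCode?_some_mem {l : List Char} {c : String} (h : pvCode? l = some c) :
    String.ofList l ∈ blanksInds := by
  by_contra hn
  simp [pvCode?_none_of_notMem l hn] at h

lemma pvScan_some_length {l : List Char} {c : String} (h : pvCode? l = some c) :
    l.length = 7 := by
  have := pvInds_len _ (pvCode?_some_mem h)
  simpa using this

lemma pvScan_short (l : List Char) (h : l.length < 7) : pvScan l = ([], l) := by
  induction l with
  | nil => simp [pvScan]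
  | cons c rest ih =>
    simp only [List.length_cons] at h
    rw [pvScan]
    have hw : pvCode? (List.take 7 (c :: rest)) = none := by
      rcases hc : pvCode? (List.take 7 (c :: rest)) with _ | code
      · rfl
      · have := pvScan_some_length hc
        simp at this; omega
    rw [hw]
    simp [ih (by omega)]

lemma pvJoinNil (xs : List String) :
    PySem.Str.join "" xs = String.ofList ((xs.map String.toList).flatten) := by
  have hint : ∀ (ls : List (List Char)), List.intercalate [] ls = ls.flatten := by
    intro ls
    induction ls with
    | nil => simp [List.intercalate]
    | cons a t ih =>
      simp at ih ⊢
      cases t <;> simp_all [List.intercalate]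
  rw [← String.ofList_toList (s := PySem.Str.join "" xs)]
  congr 1
  simp [pysem, PySem.Chars.join]
  exact hint _

-- B's loop computes the common scan
lemma blanksAltLoop_eq (k : Nat) :
    ∀ (cs : List Char) (i : Nat) (q : List String) (parts : List String),
      cs.length - i ≤ k →
      blanksAltLoop cs i q parts =
        (q ++ (pvScan (cs.drop i)).1,
         String.ofList ((parts.map String.toList).flatten ++ (pvScan (cs.drop i)).2)) := by
  induction k with
  | zero =>
    intro cs i q parts hk
    have hge : cs.length ≤ i := by omega
    rw [blanksAltLoop]
    simp [Nat.not_lt.mpr hge, List.drop_eq_nil_of_le hge, pvScan, pvJoinNil]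
  | succ k ih =>
    intro cs i q parts hk
    by_cases hlt : i < cs.length
    · have hdrop : cs.drop i = cs[i] :: cs.drop (i+1) := List.drop_eq_getElem_cons hlt
      rw [blanksAltLoop]
      simp only [hlt, dif_pos]
      have hwin : (cs.drop i).take 7 = List.take 7 (cs[i] :: cs.drop (i+1)) := by rw [hdrop]
      rcases hcode : PySem.Dict.get? blanksMapping (String.ofList ((cs.drop i).take 7)) with _ | code
      · -- no match: consume one character
        show blanksAltLoop cs (i+1) q (parts ++ [String.ofList [cs[i]]]) = _
        rw [ih cs (i+1) q (parts ++ [String.ofList [cs[i]]]) (by omega)]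
        have hs : pvScan (cs.drop i) =
            ((pvScan (cs.drop (i+1))).1, cs[i] :: (pvScan (cs.drop (i+1))).2) := by
          rw [hdrop, pvScan]
          have : pvCode? (List.take 7 (cs[i] :: cs.drop (i+1))) = none := by
            rw [pvCode?, ← hwin, hcode]
          rw [this]
        rw [hs]; simp
      · -- match: consume seven characters
        show blanksAltLoop cs (i+7) (q ++ [code]) (parts ++ ["_______"]) = _
        rw [ih cs (i+7) (q ++ [code]) (parts ++ ["_______"]) (by omega)]
        have hs : pvScan (cs.drop i) =
            (code :: (pvScan (cs.drop (i+7))).1,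
             List.replicate 7 '_' ++ (pvScan (cs.drop (i+7))).2) := by
          rw [hdrop, pvScan]
          have : pvCode? (List.take 7 (cs[i] :: cs.drop (i+1))) = some code := by
            rw [pvCode?, ← hwin, hcode]
          rw [this]
          have : (cs.drop (i+1)).drop 6 = cs.drop (i+7) := by
            rw [List.drop_drop]
          rw [this]
        rw [hs]
        have h7 : ("_______" : String).toList = List.replicate 7 '_' := by decide
        simp [h7]
    · rw [blanksAltLoop]
      simp [hlt, List.drop_eq_nil_of_le (by omega : cs.length ≤ i), pvScan, pvJoinNil]

-- a window beginning with '_' is not an indicator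
lemma notMem_of_head_underscore (l : List Char) :
    String.ofList ('_' :: l) ∉ blanksInds := by
  intro hmem
  revert hmem; simp [blanksInds]
  refine ⟨?_, ?_, ?_, ?_, ?_, ?_⟩ <;>
    · intro h
      have := congrArg (fun s => s.toList) h
      simp at this

-- slice bridges specialised to the shapes the A-port uses
lemma pvSliceWin (s : String) (i : Nat) :
    (PySem.Str.slice s (some (i : Int)) (some ((i : Int) + 7))).toList =
      (s.toList.drop i).take 7 := by
  have := PySem.List.slice_natCast_add (xs := s.toList) (j := i) (n := 7)
  simp [pysem]; exact_mod_cast this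

lemma pvSliceTo (s : String) (i : Nat) :
    (PySem.Str.slice s none (some (i : Int))).toList = s.toList.take i := by
  simp [pysem]

lemma pvSliceFrom (s : String) (i : Nat) :
    (PySem.Str.slice s (some ((i : Int) + 7)) none).toList = s.toList.drop (i + 7) := by
  have := PySem.List.slice_from_natCast (xs := s.toList) (a := i + 7)
  simp [pysem]; push_cast at this ⊢; exact this

lemma pvStep (c : Char) (rest' : List Char) (code : String)
    (hc : pvCode? (List.take 7 (c :: rest')) = some code) :
    pvScan (c :: rest')
      = (code :: (pvScan (rest'.drop 6)).1, List.replicate 7 '_' ++ (pvScan (rest'.drop 6)).2) := by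
  rw [pvScan, hc]

-- A's loop also computes the common scan: state = pre (passed chars) ++ m pending
-- underscores of the last splice ++ rest (untouched tail), fuel = m + |rest|
lemma blanksLoop_eq (k : Nat) :
    ∀ (m : Nat), m ≤ 6 →
    ∀ (pre rest : List Char) (q : List String) (s : String),
      s.toList = pre ++ List.replicate m '_' ++ rest →
      k = m + rest.length →
      blanksLoop k pre.length q s =
        (q ++ (pvScan rest).1,
         String.ofList (pre ++ List.replicate m '_' ++ (pvScan rest).2)) := by
  induction k using Nat.strong_induction_on with
  | _ k ih =>
    intro m hm pre rest q s hs hk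
    match k, hk with
    | 0, hk =>
      have hm0 : m = 0 := by omega
      have hr0 : rest = [] := List.eq_nil_of_length_eq_zero (by omega)
      subst hm0; subst hr0
      rw [blanksLoop]
      simp [pvScan] at hs ⊢
      rw [← hs, String.ofList_toList]
    | (K+1), hk =>
      have hs' : s.toList = pre ++ (List.replicate m '_' ++ rest) := by
        rw [hs, List.append_assoc]
      have hseg : (PySem.Str.slice s (some (pre.length : Int))
            (some ((pre.length : Int) + 7))).toList
          = List.take 7 (List.replicate m '_' ++ rest) := by
        rw [pvSliceWin, hs', List.drop_left]
      simp only [blanksLoop]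
      by_cases hmem : PySem.Str.slice s (some (pre.length : Int))
          (some ((pre.length : Int) + 7)) ∈ blanksInds
      · -- the window matches an indicator; then m = 0 (no pending underscores)
        rcases m with _ | m'
        swap
        · exfalso
          have h1 : List.take 7 (List.replicate (m' + 1) '_' ++ rest)
              = '_' :: List.take 6 (List.replicate m' '_' ++ rest) := by
            simp [List.replicate_succ]
          apply notMem_of_head_underscore (List.take 6 (List.replicate m' '_' ++ rest))
          rw [← h1, ← hseg, String.ofList_toList]
          exact hmem
        simp only [List.replicate_zero, List.nil_append, List.append_nil, Nat.zero_add] at hseg hs hk ⊢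
        have hc : pvCode? (List.take 7 rest)
            = PySem.Dict.get? blanksMapping (PySem.Str.slice s (some (pre.length : Int))
                (some ((pre.length : Int) + 7))) := by
          rw [pvCode?, ← hseg, String.ofList_toList]
        have hlen7 : 7 ≤ rest.length := by
          have h7 := pvInds_len _ hmem
          rw [hseg] at h7
          simp at h7; omega
        rw [if_pos hmem]
        have hs2 : (PySem.Str.slice s none (some (pre.length : Int)) ++ "_______" ++
              PySem.Str.slice s (some ((pre.length : Int) + 7)) none).toList
            = pre ++ List.replicate 7 '_' ++ rest.drop 7 := by
          have h7l : ("_______" : String).toList = List.replicate 7 '_' := by decide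
          simp only [String.toList_append, pvSliceTo, pvSliceFrom, h7l, hs,
            List.take_left, List.drop_length_add_append]
        have hbrk : (((pre.length : Int) + 7 =
              PySem.Str.len (PySem.Str.slice s none (some (pre.length : Int)) ++ "_______" ++
                PySem.Str.slice s (some ((pre.length : Int) + 7)) none)) ↔ rest.length = 7) := by
          rw [PySem.Str.len_eq, hs2]
          simp; omega
        rcases rest with _ | ⟨c, rest'⟩
        · simp at hlen7
        simp [blanksInds] at hmem
        rcases hmem with h | h | h | h | h | h
        · rw [h] at hc ⊢
          simp [blanksMapping, PySem.Dict.get?] at hc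
          simp only [String.reduceEq, reduceIte]
          have hscan := pvStep c rest' "s" (by simpa using hc)
          by_cases hb : (c :: rest').length = 7
          · rw [if_pos (hbrk.mpr hb)]
            have hdr : rest'.drop 6 = [] := by
              apply List.eq_nil_iff_length_eq_zero.mpr
              simp at hb ⊢; omega
            have hdr7 : (c :: rest').drop 7 = [] := by
              simp only [List.drop_succ_cons]; exact hdr
            rw [hscan, hdr, ← String.ofList_toList (s := PySem.Str.slice s none (some (pre.length : Int)) ++
                "_______" ++ PySem.Str.slice s (some ((pre.length : Int) + 7)) none), hs2, hdr7]
            simp [pvScan]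
          · rw [if_neg (fun hx => hb (hbrk.mp hx))]
            have hKval : K = 6 + (rest'.drop 6).length := by
              simp only [List.length_drop, List.length_cons] at hk hb hlen7 ⊢
              omega
            have hih := ih K (by omega) 6 (by omega) (pre ++ ['_']) (rest'.drop 6) (q ++ ["s"])
              (PySem.Str.slice s none (some (pre.length : Int)) ++ "_______" ++
                PySem.Str.slice s (some ((pre.length : Int) + 7)) none)
              (by rw [hs2]
                  simp [List.replicate_succ, List.append_assoc])
              hKval
            have hidx : (pre ++ ['_']).length = pre.length + 1 := by simp
            rw [hidx] at hih
            rw [hih, hscan]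
            simp [List.replicate_succ]
        · rw [h] at hc ⊢
          simp [blanksMapping, PySem.Dict.get?] at hc
          simp only [String.reduceEq, reduceIte]
          have hscan := pvStep c rest' "p" (by simpa using hc)
          by_cases hb : (c :: rest').length = 7
          · rw [if_pos (hbrk.mpr hb)]
            have hdr : rest'.drop 6 = [] := by
              apply List.eq_nil_iff_length_eq_zero.mpr
              simp at hb ⊢; omega
            have hdr7 : (c :: rest').drop 7 = [] := by
              simp only [List.drop_succ_cons]; exact hdr
            rw [hscan, hdr, ← String.ofList_toList (s := PySem.Str.slice s none (some (pre.length : Int)) ++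
                "_______" ++ PySem.Str.slice s (some ((pre.length : Int) + 7)) none), hs2, hdr7]
            simp [pvScan]
          · rw [if_neg (fun hx => hb (hbrk.mp hx))]
            have hKval : K = 6 + (rest'.drop 6).length := by
              simp only [List.length_drop, List.length_cons] at hk hb hlen7 ⊢
              omega
            have hih := ih K (by omega) 6 (by omega) (pre ++ ['_']) (rest'.drop 6) (q ++ ["p"])
              (PySem.Str.slice s none (some (pre.length : Int)) ++ "_______" ++
                PySem.Str.slice s (some ((pre.length : Int) + 7)) none)
              (by rw [hs2]
                  simp [List.replicate_succ, List.append_assoc])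
              hKval
            have hidx : (pre ++ ['_']).length = pre.length + 1 := by simp
            rw [hidx] at hih
            rw [hih, hscan]
            simp [List.replicate_succ]
        · rw [h] at hc ⊢
          simp [blanksMapping, PySem.Dict.get?] at hc
          simp only [String.reduceEq, reduceIte]
          have hscan := pvStep c rest' "v" (by simpa using hc)
          by_cases hb : (c :: rest').length = 7
          · rw [if_pos (hbrk.mpr hb)]
            have hdr : rest'.drop 6 = [] := by
              apply List.eq_nil_iff_length_eq_zero.mpr
              simp at hb ⊢; omega
            have hdr7 : (c :: rest').drop 7 = [] := by
              simp only [List.drop_succ_cons]; exact hdr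
            rw [hscan, hdr, ← String.ofList_toList (s := PySem.Str.slice s none (some (pre.length : Int)) ++
                "_______" ++ PySem.Str.slice s (some ((pre.length : Int) + 7)) none), hs2, hdr7]
            simp [pvScan]
          · rw [if_neg (fun hx => hb (hbrk.mp hx))]
            have hKval : K = 6 + (rest'.drop 6).length := by
              simp only [List.length_drop, List.length_cons] at hk hb hlen7 ⊢
              omega
            have hih := ih K (by omega) 6 (by omega) (pre ++ ['_']) (rest'.drop 6) (q ++ ["v"])
              (PySem.Str.slice s none (some (pre.length : Int)) ++ "_______" ++
                PySem.Str.slice s (some ((pre.length : Int) + 7)) none)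
              (by rw [hs2]
                  simp [List.replicate_succ, List.append_assoc])
              hKval
            have hidx : (pre ++ ['_']).length = pre.length + 1 := by simp
            rw [hidx] at hih
            rw [hih, hscan]
            simp [List.replicate_succ]
        · rw [h] at hc ⊢
          simp [blanksMapping, PySem.Dict.get?] at hc
          simp only [String.reduceEq, reduceIte]
          have hscan := pvStep c rest' "j" (by simpa using hc)
          by_cases hb : (c :: rest').length = 7
          · rw [if_pos (hbrk.mpr hb)]
            have hdr : rest'.drop 6 = [] := by
              apply List.eq_nil_iff_length_eq_zero.mpr
              simp at hb ⊢; omega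
            have hdr7 : (c :: rest').drop 7 = [] := by
              simp only [List.drop_succ_cons]; exact hdr
            rw [hscan, hdr, ← String.ofList_toList (s := PySem.Str.slice s none (some (pre.length : Int)) ++
                "_______" ++ PySem.Str.slice s (some ((pre.length : Int) + 7)) none), hs2, hdr7]
            simp [pvScan]
          · rw [if_neg (fun hx => hb (hbrk.mp hx))]
            have hKval : K = 6 + (rest'.drop 6).length := by
              simp only [List.length_drop, List.length_cons] at hk hb hlen7 ⊢
              omega
            have hih := ih K (by omega) 6 (by omega) (pre ++ ['_']) (rest'.drop 6) (q ++ ["j"])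
              (PySem.Str.slice s none (some (pre.length : Int)) ++ "_______" ++
                PySem.Str.slice s (some ((pre.length : Int) + 7)) none)
              (by rw [hs2]
                  simp [List.replicate_succ, List.append_assoc])
              hKval
            have hidx : (pre ++ ['_']).length = pre.length + 1 := by simp
            rw [hidx] at hih
            rw [hih, hscan]
            simp [List.replicate_succ]
        · rw [h] at hc ⊢
          simp [blanksMapping, PySem.Dict.get?] at hc
          simp only [String.reduceEq, reduceIte]
          have hscan := pvStep c rest' "d" (by simpa using hc)
          by_cases hb : (c :: rest').length = 7
          · rw [if_pos (hbrk.mpr hb)]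
            have hdr : rest'.drop 6 = [] := by
              apply List.eq_nil_iff_length_eq_zero.mpr
              simp at hb ⊢; omega
            have hdr7 : (c :: rest').drop 7 = [] := by
              simp only [List.drop_succ_cons]; exact hdr
            rw [hscan, hdr, ← String.ofList_toList (s := PySem.Str.slice s none (some (pre.length : Int)) ++
                "_______" ++ PySem.Str.slice s (some ((pre.length : Int) + 7)) none), hs2, hdr7]
            simp [pvScan]
          · rw [if_neg (fun hx => hb (hbrk.mp hx))]
            have hKval : K = 6 + (rest'.drop 6).length := by
              simp only [List.length_drop, List.length_cons] at hk hb hlen7 ⊢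
              omega
            have hih := ih K (by omega) 6 (by omega) (pre ++ ['_']) (rest'.drop 6) (q ++ ["d"])
              (PySem.Str.slice s none (some (pre.length : Int)) ++ "_______" ++
                PySem.Str.slice s (some ((pre.length : Int) + 7)) none)
              (by rw [hs2]
                  simp [List.replicate_succ, List.append_assoc])
              hKval
            have hidx : (pre ++ ['_']).length = pre.length + 1 := by simp
            rw [hidx] at hih
            rw [hih, hscan]
            simp [List.replicate_succ]
        · rw [h] at hc ⊢
          simp [blanksMapping, PySem.Dict.get?] at hc
          simp only [String.reduceEq, reduceIte]
          have hscan := pvStep c rest' "m" (by simpa using hc)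
          by_cases hb : (c :: rest').length = 7
          · rw [if_pos (hbrk.mpr hb)]
            have hdr : rest'.drop 6 = [] := by
              apply List.eq_nil_iff_length_eq_zero.mpr
              simp at hb ⊢; omega
            have hdr7 : (c :: rest').drop 7 = [] := by
              simp only [List.drop_succ_cons]; exact hdr
            rw [hscan, hdr, ← String.ofList_toList (s := PySem.Str.slice s none (some (pre.length : Int)) ++
                "_______" ++ PySem.Str.slice s (some ((pre.length : Int) + 7)) none), hs2, hdr7]
            simp [pvScan]
          · rw [if_neg (fun hx => hb (hbrk.mp hx))]
            have hKval : K = 6 + (rest'.drop 6).length := by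
              simp only [List.length_drop, List.length_cons] at hk hb hlen7 ⊢
              omega
            have hih := ih K (by omega) 6 (by omega) (pre ++ ['_']) (rest'.drop 6) (q ++ ["m"])
              (PySem.Str.slice s none (some (pre.length : Int)) ++ "_______" ++
                PySem.Str.slice s (some ((pre.length : Int) + 7)) none)
              (by rw [hs2]
                  simp [List.replicate_succ, List.append_assoc])
              hKval
            have hidx : (pre ++ ['_']).length = pre.length + 1 := by simp
            rw [hidx] at hih
            rw [hih, hscan]
            simp [List.replicate_succ]
      · -- the window is not an indicator: the script is unchanged this iteration
        rw [if_neg hmem]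
        have hc : pvCode? (List.take 7 (List.replicate m '_' ++ rest)) = none := by
          apply pvCode?_none_of_notMem
          rw [← hseg, String.ofList_toList]
          exact hmem
        have hbrk : (((pre.length : Int) + 7 = PySem.Str.len s) ↔ m + rest.length = 7) := by
          rw [PySem.Str.len_eq, hs]
          simp; omega
        by_cases hb : m + rest.length = 7
        · rw [if_pos (hbrk.mpr hb)]
          have hshort : pvScan rest = ([], rest) := by
            rcases m with _ | m'
            · -- m = 0 : the 7-char window itself fails, shorter ones cannot match
              simp only [List.replicate_zero, List.nil_append] at hc
              rcases rest with _ | ⟨c, rest'⟩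
              · simp [pvScan]
              · rw [pvScan, hc, pvScan_short rest' (by simp only [List.length_cons] at hb; omega)]
            · exact pvScan_short rest (by omega)
          rw [hshort]
          simp [← hs, String.ofList_toList]
        · rw [if_neg (fun hx => hb (hbrk.mp hx))]
          rcases m with _ | m'
          · -- m = 0 : consume one ordinary character
            simp only [List.replicate_zero, List.nil_append, Nat.zero_add] at hc hs' hk ⊢
            rcases rest with _ | ⟨c, rest'⟩
            · simp at hk
            have hih := ih K (by omega) 0 (by omega) (pre ++ [c]) rest' q s
              (by rw [hs']; simp)
              (by simp only [List.length_cons] at hk; omega)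
            have hidx : (pre ++ [c]).length = pre.length + 1 := by simp
            rw [hidx] at hih
            rw [hih]
            rw [pvScan, hc]
            simp
          · -- m ≥ 1 : still walking over the last splice's underscores
            have hih := ih K (by omega) m' (by omega) (pre ++ ['_']) rest q s
              (by rw [hs]; simp [List.replicate_succ, List.append_assoc])
              (by omega)
            have hidx : (pre ++ ['_']).length = pre.length + 1 := by simp
            rw [hidx] at hih
            rw [hih]
            simp [List.replicate_succ]

-- ===== VERDICT (by name: the statement is the Claim_ definition above) =====
theorem blanks_spec : Claim_equal_blanks := by
  intro script _
  unfold Spec_blanks blanks blanks_alt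
  rw [blanksAltLoop_eq (script.toList.length) script.toList 0 [] [] (by omega)]
  have h := blanksLoop_eq (PySem.Str.len script).toNat 0 (by omega) [] script.toList [] script
    (by simp) (by simp [PySem.Str.len_eq])
  simpa using h
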